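-- pv_equiv track=rewrite | github.com/songzy12/CodeForces | Educational Codeforces Round/Educational Codeforces Round 66/A.py | solve
-- ===== SOURCE A (Python) =====
-- def solve(n, k):
--     cnt = 0
--     while n != 0:
--         if n % k == 0:
--             cnt += 1
--             n //= k
--         else:
--             cnt += n % k
--             n -= n % k
--     return cnt
-- ===== SOURCE B (Python) =====
-- def solve(n, k):
--     if n == 0:
--         return 0
--     digits = []
--     while n:
--         digits.append(n % k)
--         n //= k
--     return sum(digits) + len(digits) - 1
-- ===== Notes on version B (the rewrite author's own statement) =====
-- stated objective: simpler
-- what changed: A interleaves a subtract-the-remainder branch with a divide branch accumulating a counter in one loop; B first materialises the list of base-k digits in a plain extraction pass, then returns sum(digits) + len(digits) - 1 as a closed correction over that list.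
import Mathlib
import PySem

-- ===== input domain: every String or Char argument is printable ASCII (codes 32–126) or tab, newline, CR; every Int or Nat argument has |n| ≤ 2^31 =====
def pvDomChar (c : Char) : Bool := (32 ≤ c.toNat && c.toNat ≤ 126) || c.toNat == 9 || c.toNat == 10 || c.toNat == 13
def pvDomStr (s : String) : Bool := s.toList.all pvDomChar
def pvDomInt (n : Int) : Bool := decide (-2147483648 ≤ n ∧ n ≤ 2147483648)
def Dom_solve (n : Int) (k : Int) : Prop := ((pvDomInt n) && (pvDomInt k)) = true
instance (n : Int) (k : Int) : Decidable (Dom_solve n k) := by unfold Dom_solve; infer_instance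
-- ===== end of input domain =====

-- B replaces A's interleaved subtract-remainder/divide counting loop by building the list of
-- base-k digits and returning sum(digits) + len(digits) - 1; same cost, simpler control flow.

-- ===== PORT A =====
-- A's while-loop as fuel recursion; the fuel (chosen in `solve`) exceeds the loop's
-- iteration count on every input admitted by Pre_solve, so this is exactly A's loop there.
def solveGoA : Nat → Int → Int → Int → Int
  | 0, _, _, cnt => cnt
  | f + 1, n, k, cnt =>
    if n = 0 then cnt
    else if PySem.Int.mod n k = 0 then
      solveGoA f (PySem.Int.floordiv n k) k (cnt + 1)
    else
      solveGoA f (n - PySem.Int.mod n k) k (cnt + PySem.Int.mod n k)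

def solve (n : Int) (k : Int) : Int := solveGoA (2 * (2 * n.natAbs + 1)) n k 0

-- ===== PORT B =====
-- Source B's digit-extraction loop, as a fuel recursion producing the digits list in the
-- same order the Python appends them.
def pyDigits : Nat → Int → Int → List Int
  | 0, _, _ => []
  | f + 1, n, k =>
    if n = 0 then []
    else PySem.Int.mod n k :: pyDigits f (PySem.Int.floordiv n k) k

def solve_alt (n : Int) (k : Int) : Int :=
  if n = 0 then 0
  else
    let ds := pyDigits (2 * n.natAbs + 1) n k
    ds.sum + ds.length - 1

-- ===== PRECONDITION & SPEC =====
-- Pre_ excludes exactly the inputs where A never returns: with n ≠ 0, k = 0 raises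
-- ZeroDivisionError and k ∈ {-1, 1} or (k ≥ 2 with n < 0) make A's loop run forever.
def Pre_solve (n : Int) (k : Int) : Prop := n = 0 ∨ (0 ≤ n ∧ 2 ≤ k) ∨ k ≤ -2
instance (n : Int) (k : Int) : Decidable (Pre_solve n k) := by unfold Pre_solve; infer_instance
def pvWitness_solve : Int × Int := (100, 3)

def Spec_solve (n : Int) (k : Int) (out : Int) : Prop := out = solve_alt n k
instance (n : Int) (k : Int) (out : Int) : Decidable (Spec_solve n k out) := by unfold Spec_solve; infer_instance

-- ===== CLAIM (what is proved, stated in full; the proofs are below) =====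
def Claim_equal_solve : Prop := ∀ (n : Int) (k : Int), Dom_solve n k → Pre_solve n k → Spec_solve n k (solve n k)

-- ===== LEMMAS AND PROOFS =====

-- loop measure: strictly decreases along n ↦ n // k in both admitted regimes
def mMeas (n : Int) : Nat := 2 * n.natAbs + (if 0 < n then 1 else 0)

theorem solveGoA_zero (g : Nat) (k cnt : Int) : solveGoA g 0 k cnt = cnt := by
  cases g <;> simp [solveGoA]

theorem pyDigits_zero (f : Nat) (k : Int) : pyDigits f 0 k = [] := by
  cases f <;> simp [pyDigits]

theorem solveGoA_step (g : Nat) (n k cnt : Int) (hn : n ≠ 0) :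
    solveGoA (g + 1) n k cnt =
      if PySem.Int.mod n k = 0 then solveGoA g (PySem.Int.floordiv n k) k (cnt + 1)
      else solveGoA g (n - PySem.Int.mod n k) k (cnt + PySem.Int.mod n k) := by
  simp [solveGoA, hn]

-- one step of arithmetic: decomposition, regime preservation, measure decrease
theorem stepFacts (n k : Int) (hn : n ≠ 0) (hr : (0 ≤ n ∧ 2 ≤ k) ∨ k ≤ -2) :
    n = PySem.Int.floordiv n k * k + PySem.Int.mod n k ∧
    ((0 ≤ PySem.Int.floordiv n k ∧ 2 ≤ k) ∨ k ≤ -2) ∧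
    mMeas (PySem.Int.floordiv n k) < mMeas n := by
  have hdec := PySem.Int.floordiv_mul_add_mod n k
  set q := PySem.Int.floordiv n k with hq
  set r := PySem.Int.mod n k with hrdef
  refine ⟨hdec.symm, ?_, ?_⟩
  · rcases hr with ⟨hn0, hk⟩ | hk
    · left
      refine ⟨?_, hk⟩
      by_contra hqneg
      push Not at hqneg
      have h1 : 0 ≤ r := PySem.Int.mod_nonneg n (by omega)
      have h2 : r < k := PySem.Int.mod_lt n (by omega)
      have : q * k ≤ -k := by nlinarith
      omega
    · right; exact hk
  · rcases hr with ⟨hn0, hk⟩ | hk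
    · have h1 : 0 ≤ r := PySem.Int.mod_nonneg n (by omega)
      have h2 : r < k := PySem.Int.mod_lt n (by omega)
      have hq0 : 0 ≤ q := by
        by_contra hqneg
        push Not at hqneg
        have : q * k ≤ -k := by nlinarith
        omega
      have hqn : q < n := by
        rcases eq_or_lt_of_le hq0 with h | h
        · omega
        · nlinarith
      simp only [mMeas]
      split_ifs <;> omega
    · have hb := PySem.Int.mod_neg_bounds n (b := k) (by omega)
      rcases lt_trichotomy n 0 with hneg | hzero | hpos
      · have hq0 : 0 ≤ q := by
          by_contra hqneg
          push Not at hqneg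
          have : 0 ≤ (q + 1) * k := by nlinarith
          nlinarith
        have hbound : q * k ≤ q * (-2) := by nlinarith
        simp only [mMeas]
        split_ifs <;> omega
      · omega
      · have hq0 : q < 0 := by
          by_contra hqneg
          push Not at hqneg
          have : q * k ≤ 0 := by nlinarith
          omega
        have hbound : (-q - 1) * (-k) ≥ 2 * (-q - 1) := by nlinarith
        have : -q ≤ n := by nlinarith
        simp only [mMeas]
        split_ifs <;> omega

theorem floordiv_mul_cancel (q k : Int) (hk : k ≠ 0) :
    PySem.Int.floordiv (q * k) k = q := by
  have h1 := PySem.Int.floordiv_mul_add_mod (q * k) k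
  have h2 : PySem.Int.mod (q * k) k = 0 :=
    (PySem.Int.mod_eq_zero_iff_dvd _ _).mpr ⟨q, mul_comm q k⟩
  rw [h2, add_zero] at h1
  exact mul_right_cancel₀ hk h1

theorem mainLemma : ∀ (f : Nat) (n k : Int) (g : Nat) (cnt : Int),
    n ≠ 0 → ((0 ≤ n ∧ 2 ≤ k) ∨ k ≤ -2) → mMeas n ≤ f → 2 * f ≤ g →
    solveGoA g n k cnt =
      cnt + (pyDigits f n k).sum + ((pyDigits f n k).length : Int) - 1 := by
  intro f
  induction f with
  | zero =>
    intro n k g cnt hn _ hm _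
    exfalso
    have : 1 ≤ n.natAbs := by omega
    simp only [mMeas] at hm
    split_ifs at hm <;> omega
  | succ f ih =>
    intro n k g cnt hn hr hm hg
    have hk0 : k ≠ 0 := by rcases hr with ⟨_, h⟩ | h <;> omega
    obtain ⟨hdec, hrq, hmq⟩ := stepFacts n k hn hr
    set q := PySem.Int.floordiv n k with hqdef
    set r := PySem.Int.mod n k with hrdef
    have hmn2 : 2 ≤ mMeas n := by
      have : 1 ≤ n.natAbs := by omega
      simp only [mMeas]; split_ifs <;> omega
    obtain ⟨g₂, rfl⟩ : ∃ g₂, g = g₂ + 2 := ⟨g - 2, by omega⟩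
    have hmqf : mMeas q ≤ f := by omega
    have hgf : 2 * f ≤ g₂ := by omega
    have hD : pyDigits (f + 1) n k = r :: pyDigits f q k := by
      simp [pyDigits, hn, ← hrdef, ← hqdef]
    rw [hD, List.sum_cons, List.length_cons,
        show g₂ + 2 = (g₂ + 1) + 1 from rfl, solveGoA_step (g₂ + 1) n k cnt hn,
        ← hrdef, ← hqdef]
    by_cases hrz : r = 0
    · have hq0 : q ≠ 0 := by
        intro h; rw [h] at hdec; simp at hdec; omega
      rw [if_pos hrz, ih q k (g₂ + 1) (cnt + 1) hq0 hrq hmqf (by omega), hrz]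
      push_cast
      ring
    · have hsub : n - r = q * k := by omega
      rw [if_neg hrz, hsub]
      by_cases hq0 : q = 0
      · rw [hq0, zero_mul, solveGoA_zero, pyDigits_zero]
        simp
      · have hqk : q * k ≠ 0 := mul_ne_zero hq0 hk0
        have hmodqk : PySem.Int.mod (q * k) k = 0 :=
          (PySem.Int.mod_eq_zero_iff_dvd _ _).mpr ⟨q, mul_comm q k⟩
        rw [solveGoA_step g₂ (q * k) k (cnt + r) hqk, if_pos hmodqk,
            floordiv_mul_cancel q k hk0,
            ih q k g₂ (cnt + r + 1) hq0 hrq hmqf hgf]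
        push_cast
        ring

-- ===== VERDICT (by name: the statement is the Claim_ definition above) =====
theorem solve_spec : Claim_equal_solve := by
  intro n k _ hpre
  unfold Spec_solve solve solve_alt
  by_cases hn : n = 0
  · subst hn; simp [solveGoA_zero]
  · rw [if_neg hn]
    have hr : (0 ≤ n ∧ 2 ≤ k) ∨ k ≤ -2 := by
      rcases hpre with h | h | h
      · exact absurd h hn
      · exact Or.inl h
      · exact Or.inr h
    have hm : mMeas n ≤ 2 * n.natAbs + 1 := by
      simp only [mMeas]; split_ifs <;> omega
    rw [mainLemma (2 * n.natAbs + 1) n k (2 * (2 * n.natAbs + 1)) 0 hn hr hm (by omega)]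
    ring
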